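-- pv_equiv track=rewrite | github.com/MaoXiaoYuZ/Long-Novel-GPT | backend/xapp.py | get_delta_chunks
-- ===== SOURCE A (Python) =====
-- def get_delta_chunks(prev_chunks, curr_chunks):
--     """Calculate delta between previous and current chunks"""
--     if not prev_chunks or len(prev_chunks) != len(curr_chunks):
--         return "init", curr_chunks
--
--     # Check if all strings in current chunks start with their corresponding previous strings
--     is_delta = True
--     for prev_chunk, curr_chunk in zip(prev_chunks, curr_chunks):
--         if len(prev_chunk) != len(curr_chunk):
--             is_delta = False
--             break
--         for prev_str, curr_str in zip(prev_chunk, curr_chunk):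
--             if not curr_str.startswith(prev_str):
--                 is_delta = False
--                 break
--         if not is_delta:
--             break
--
--     if not is_delta:
--         return "init", curr_chunks
--
--     # Calculate deltas
--     delta_chunks = []
--     for prev_chunk, curr_chunk in zip(prev_chunks, curr_chunks):
--         delta_chunk = []
--         for prev_str, curr_str in zip(prev_chunk, curr_chunk):
--             delta_str = curr_str[len(prev_str):]
--             delta_chunk.append(delta_str)
--         delta_chunks.append(delta_chunk)
--
--     return "delta", delta_chunks
-- ===== SOURCE B (Python) =====
-- def get_delta_chunks(prev_chunks, curr_chunks):
--     """Single pass: validate and compute deltas together, abandoning on first mismatch."""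
--     if not prev_chunks or len(prev_chunks) != len(curr_chunks):
--         return "init", curr_chunks
--     delta_chunks = []
--     for prev_chunk, curr_chunk in zip(prev_chunks, curr_chunks):
--         if len(prev_chunk) != len(curr_chunk):
--             return "init", curr_chunks
--         delta_chunk = []
--         for prev_str, curr_str in zip(prev_chunk, curr_chunk):
--             if not curr_str.startswith(prev_str):
--                 return "init", curr_chunks
--             delta_chunk.append(curr_str[len(prev_str):])
--         delta_chunks.append(delta_chunk)
--     return "delta", delta_chunks
-- ===== Notes on version B (the rewrite author's own statement) =====
-- stated objective: simpler
-- what changed: Fused A's separate validate pass and delta-computation pass into one pass over zip(prev_chunks, curr_chunks) that builds deltas while checking, returning 'init' immediately on the first mismatch.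
import Mathlib
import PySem

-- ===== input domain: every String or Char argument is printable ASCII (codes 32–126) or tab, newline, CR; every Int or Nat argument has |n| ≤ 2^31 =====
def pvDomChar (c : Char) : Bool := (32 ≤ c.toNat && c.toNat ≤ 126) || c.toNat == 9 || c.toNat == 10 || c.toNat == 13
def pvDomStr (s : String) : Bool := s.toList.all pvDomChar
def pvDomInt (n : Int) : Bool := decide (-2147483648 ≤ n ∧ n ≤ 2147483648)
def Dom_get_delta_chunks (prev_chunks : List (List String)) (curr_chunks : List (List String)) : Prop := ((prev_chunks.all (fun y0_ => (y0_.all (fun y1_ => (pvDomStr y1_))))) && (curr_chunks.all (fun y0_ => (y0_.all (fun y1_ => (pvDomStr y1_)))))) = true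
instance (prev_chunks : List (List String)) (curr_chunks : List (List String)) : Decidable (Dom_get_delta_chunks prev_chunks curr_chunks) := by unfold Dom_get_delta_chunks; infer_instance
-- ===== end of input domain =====

-- B fuses A's separate validate pass and delta pass into one pass that builds deltas
-- while checking, discarding them on the first mismatch (objective: simpler).

-- ===== PORT A =====
-- inner check loop: break on first failing startswith
def pvA_checkStrs : List String → List String → Bool
  | p :: ps, c :: cs =>
      if !(PySem.Str.startswith c p) then false else pvA_checkStrs ps cs
  | _, _ => true

-- outer check loop: break on length mismatch or failed inner loop
def pvA_check : List (List String) → List (List String) → Bool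
  | p :: ps, c :: cs =>
      if p.length ≠ c.length then false
      else if pvA_checkStrs p c then pvA_check ps cs else false
  | _, _ => true

-- second phase inner loop: delta_chunk.append(curr_str[len(prev_str):])
def pvA_deltaChunk : List String → List String → List String
  | p :: ps, c :: cs =>
      PySem.Str.slice c (some (PySem.Str.len p)) none :: pvA_deltaChunk ps cs
  | _, _ => []

-- second phase outer loop
def pvA_deltas : List (List String) → List (List String) → List (List String)
  | p :: ps, c :: cs => pvA_deltaChunk p c :: pvA_deltas ps cs
  | _, _ => []

def get_delta_chunks (prev_chunks : List (List String)) (curr_chunks : List (List String)) : String × List (List String) :=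
  if prev_chunks = [] ∨ prev_chunks.length ≠ curr_chunks.length then ("init", curr_chunks)
  else if !pvA_check prev_chunks curr_chunks then ("init", curr_chunks)
  else ("delta", pvA_deltas prev_chunks curr_chunks)

-- ===== PORT B =====
-- one pass over a chunk pair: none encodes B's early `return "init"`
def pvB_chunk : List String → List String → Option (List String)
  | p :: ps, c :: cs =>
      if PySem.Str.startswith c p then
        (pvB_chunk ps cs).map (PySem.Str.slice c (some (PySem.Str.len p)) none :: ·)
      else none
  | _, _ => some []

-- one pass over the chunk lists: none encodes B's early `return "init"`
def pvB_go : List (List String) → List (List String) → Option (List (List String))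
  | p :: ps, c :: cs =>
      if p.length ≠ c.length then none
      else match pvB_chunk p c with
        | none => none
        | some d => (pvB_go ps cs).map (d :: ·)
  | _, _ => some []

def get_delta_chunks_alt (prev_chunks : List (List String)) (curr_chunks : List (List String)) : String × List (List String) :=
  if prev_chunks = [] ∨ prev_chunks.length ≠ curr_chunks.length then ("init", curr_chunks)
  else match pvB_go prev_chunks curr_chunks with
    | none => ("init", curr_chunks)
    | some ds => ("delta", ds)

-- ===== PRECONDITION & SPEC =====
def Spec_get_delta_chunks (prev_chunks : List (List String)) (curr_chunks : List (List String)) (out : String × List (List String)) : Prop := out = get_delta_chunks_alt prev_chunks curr_chunks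
instance (prev_chunks : List (List String)) (curr_chunks : List (List String)) (out : String × List (List String)) : Decidable (Spec_get_delta_chunks prev_chunks curr_chunks out) := by unfold Spec_get_delta_chunks; infer_instance

-- ===== CLAIM (what is proved, stated in full; the proofs are below) =====
def Claim_equal_get_delta_chunks : Prop := ∀ (prev_chunks : List (List String)) (curr_chunks : List (List String)), Dom_get_delta_chunks prev_chunks curr_chunks → Spec_get_delta_chunks prev_chunks curr_chunks (get_delta_chunks prev_chunks curr_chunks)

-- ===== LEMMAS AND PROOFS =====
theorem pvB_chunk_eq (p c : List String) :
    pvB_chunk p c = if pvA_checkStrs p c then some (pvA_deltaChunk p c) else none := by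
  induction p generalizing c with
  | nil => cases c <;> simp [pvB_chunk, pvA_checkStrs, pvA_deltaChunk]
  | cons x xs ih =>
    cases c with
    | nil => simp [pvB_chunk, pvA_checkStrs, pvA_deltaChunk]
    | cons y ys =>
      simp only [pvB_chunk, pvA_checkStrs, pvA_deltaChunk, ih]
      cases h : PySem.Str.startswith y x
      · simp
      · cases h2 : pvA_checkStrs xs ys <;> simp [h]

theorem pvB_go_eq (p c : List (List String)) :
    pvB_go p c = if pvA_check p c then some (pvA_deltas p c) else none := by
  induction p generalizing c with
  | nil => cases c <;> simp [pvB_go, pvA_check, pvA_deltas]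
  | cons x xs ih =>
    cases c with
    | nil => simp [pvB_go, pvA_check, pvA_deltas]
    | cons y ys =>
      simp only [pvB_go, pvA_check, pvA_deltas, ih, pvB_chunk_eq]
      by_cases h : x.length = y.length
      · cases h2 : pvA_checkStrs x y
        · simp [h]
        · cases h3 : pvA_check xs ys <;> simp [h, h2]
      · simp [h]

-- ===== VERDICT (by name: the statement is the Claim_ definition above) =====
theorem get_delta_chunks_spec : Claim_equal_get_delta_chunks := by
  intro prev curr _
  unfold Spec_get_delta_chunks get_delta_chunks get_delta_chunks_alt
  rw [pvB_go_eq]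
  split_ifs with h₁ h₂ <;> simp_all
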